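-- pv_equiv track=rewrite | github.com/yein-lee/PS | 프로그래머스/3/258705. 산 모양 타일링/산 모양 타일링.py | solution
-- ===== SOURCE A (Python) =====
-- def solution(n, tops):
--     tiles = [0] * (2*n+1)
--     for i, top in enumerate(tops):
--         if top == 1:
--             tiles[i*2+1] = 1
--
--     answer = 0
--     stack = [0]
--
--     while stack:
--         current_index = stack.pop()
--
--         if current_index >= 2*n:
--             answer += 1
--             continue
--
--         if tiles[current_index] == 1:
--             stack.append(current_index + 1)
--             stack.append(current_index + 1)
--             stack.append(current_index + 2)
--         elif tiles[current_index] == 0: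
--             stack.append(current_index + 1)
--             stack.append(current_index + 2)
--
--     return answer % 10007
-- ===== SOURCE B (Python) =====
-- def solution(n, tops):
--     # Backward DP: f(i) = number of tilings starting at index i,
--     # f(i) = w(i)*f(i+1) + f(i+2) with w(i) = 2 when the odd slot i carries a top tile.
--     a, b = 1, 1  # f(i+1), f(i+2) for the index i about to be processed
--     for i in range(2 * n - 1, -1, -1):
--         w = 2 if (i % 2 == 1 and i // 2 < len(tops) and tops[i // 2] == 1) else 1
--         a, b = w * a + b, a
--     return a % 10007
-- ===== Notes on version B (the rewrite author's own statement) =====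
-- stated objective: faster
-- what changed: Replaces A's explicit-stack DFS that enumerates every tiling path one by one with a backward linear DP (Fibonacci-like recurrence f(i)=w(i)*f(i+1)+f(i+2), weight 2 on odd indices carrying a top tile), reading weights straight from tops instead of building the tiles array.
import Mathlib
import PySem

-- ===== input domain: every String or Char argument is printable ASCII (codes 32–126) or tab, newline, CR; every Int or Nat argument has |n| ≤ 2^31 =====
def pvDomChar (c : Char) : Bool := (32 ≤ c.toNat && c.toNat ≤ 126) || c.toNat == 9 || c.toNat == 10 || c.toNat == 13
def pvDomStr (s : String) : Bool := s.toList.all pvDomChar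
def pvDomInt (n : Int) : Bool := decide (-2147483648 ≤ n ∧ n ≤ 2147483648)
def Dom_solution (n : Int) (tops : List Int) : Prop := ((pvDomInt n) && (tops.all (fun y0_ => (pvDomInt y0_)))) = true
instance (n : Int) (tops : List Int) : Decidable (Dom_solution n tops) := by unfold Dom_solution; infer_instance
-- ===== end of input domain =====

-- B replaces A's exponential stack-DFS path enumeration by a backward linear DP
-- (f(i) = w(i)*f(i+1) + f(i+2)); equivalence of results is proved below.

-- ===== PORT A =====
-- 'for i, top in enumerate(tops): if top == 1: tiles[i*2+1] = 1'
-- (Python raises IndexError when 2*i+1 is out of range; those inputs are excluded by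
-- Pre_solution, so the out-of-range List.set no-op is never observed inside the claim)
def fillTiles (tiles : List Int) (i : Nat) : List Int → List Int
  | [] => tiles
  | top :: rest => fillTiles (if top = 1 then tiles.set (i * 2 + 1) 1 else tiles) (i + 1) rest

def tilesA (n : Int) (tops : List Int) : List Int :=
  fillTiles (List.replicate (2 * n + 1).toNat 0) 0 tops

-- the 'while stack' loop; the fuel argument is only a totality guard, never exhausted
-- for fuel ≥ the measure proved below
def loopA (n : Int) (tiles : List Int) : Nat → List Int → Int → Int
  | _, [], answer => answer
  | 0, _ :: _, answer => answer
  | fuel + 1, cur :: rest, answer =>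
    if 2 * n ≤ cur then loopA n tiles fuel rest (answer + 1)
    else
      match PySem.List.pyGet? tiles cur with
      | some v =>
        if v = 1 then loopA n tiles fuel ((cur + 2) :: (cur + 1) :: (cur + 1) :: rest) answer
        else if v = 0 then loopA n tiles fuel ((cur + 2) :: (cur + 1) :: rest) answer
        else loopA n tiles fuel rest answer
      | none => answer   -- IndexError; unreachable (indices stay in range, proved below)

def solution (n : Int) (tops : List Int) : Int :=
  PySem.Int.mod (loopA n (tilesA n tops) (4 ^ (2 * n + 2).toNat) [0] 0) 10007

-- ===== PORT B =====
def stepB (tops : List Int) (ab : Int × Int) (i : Int) : Int × Int :=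
  ((if PySem.Int.mod i 2 = 1 ∧ PySem.Int.floordiv i 2 < (tops.length : Int) ∧
        PySem.List.pyGet? tops (PySem.Int.floordiv i 2) = some 1
    then 2 else 1) * ab.1 + ab.2, ab.1)

def solution_alt (n : Int) (tops : List Int) : Int :=
  PySem.Int.mod (((PySem.List.pyRange (2 * n - 1) (-1) (-1)).foldl (stepB tops) (1, 1)).1) 10007

-- ===== PRECONDITION & SPEC =====
-- Pre_ excludes exactly the inputs on which A raises IndexError: a 1 in tops at an
-- index k ≥ n makes A write tiles[2k+1] outside the tiles array.
def Pre_solution (n : Int) (tops : List Int) : Prop :=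
  ∀ k < tops.length, tops.getD k 0 = 1 → (k : Int) < n

instance (n : Int) (tops : List Int) : Decidable (Pre_solution n tops) := by
  unfold Pre_solution; infer_instance

def pvWitness_solution : Int × List Int := (2, [1, 1])

def Spec_solution (n : Int) (tops : List Int) (out : Int) : Prop := out = solution_alt n tops
instance (n : Int) (tops : List Int) (out : Int) : Decidable (Spec_solution n tops out) := by unfold Spec_solution; infer_instance

-- ===== CLAIM (what is proved, stated in full; the proofs are below) =====
def Claim_equal_solution : Prop := ∀ (n : Int) (tops : List Int), Dom_solution n tops → Pre_solution n tops → Spec_solution n tops (solution n tops)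

-- ===== LEMMAS AND PROOFS =====

-- the exact count of paths from index i (mirrors the branch structure of the loop)
def cA (n : Int) (tiles : List Int) (i : Int) : Int :=
  if h : 2 * n ≤ i then 1
  else
    match PySem.List.pyGet? tiles i with
    | some v =>
      if v = 1 then 2 * cA n tiles (i + 1) + cA n tiles (i + 2)
      else if v = 0 then cA n tiles (i + 1) + cA n tiles (i + 2)
      else 0
    | none => 0
termination_by (2 * n - i).toNat
decreasing_by all_goals omega

def meas (n : Int) (stack : List Int) : Nat :=
  (stack.map (fun x => 4 ^ ((2 * n + 2 - x).toNat))).sum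

theorem meas_cons (n : Int) (x : Int) (s : List Int) :
    meas n (x :: s) = 4 ^ ((2 * n + 2 - x).toNat) + meas n s := by
  simp [meas]

theorem pow4_bound (e : Nat) (h : 2 ≤ e) :
    2 * 4 ^ (e - 1) + 4 ^ (e - 2) + 1 ≤ 4 ^ e := by
  obtain ⟨e', rfl⟩ : ∃ e', e = e' + 2 := ⟨e - 2, by omega⟩
  have h1 : 1 ≤ 4 ^ e' := Nat.one_le_pow _ _ (by norm_num)
  simp only [Nat.add_sub_cancel, show e' + 2 - 2 = e' from by omega]
  calc 2 * 4 ^ (e' + 1) + 4 ^ e' + 1 = 9 * 4 ^ e' + 1 := by ring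
    _ ≤ 16 * 4 ^ e' := by omega
    _ = 4 ^ (e' + 2) := by ring

theorem fillTiles_length (tops : List Int) :
    ∀ (tiles : List Int) (s : Nat), (fillTiles tiles s tops).length = tiles.length := by
  induction tops with
  | nil => intro tiles s; simp [fillTiles]
  | cons top rest ih =>
    intro tiles s
    simp only [fillTiles]
    rw [ih]
    split <;> simp

theorem loopA_inv (n : Int) (tiles : List Int) (hlen : 2 * n ≤ (tiles.length : Int)) :
    ∀ (fuel : Nat) (stack : List Int) (answer : Int),
      (∀ x ∈ stack, 0 ≤ x) → meas n stack ≤ fuel →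
      loopA n tiles fuel stack answer = answer + (stack.map (cA n tiles)).sum := by
  intro fuel
  induction fuel with
  | zero =>
    intro stack answer hpos hm
    cases stack with
    | nil => simp [loopA, meas]
    | cons cur rest =>
      exfalso
      have h1 : 0 < 4 ^ ((2 * n + 2 - cur).toNat) := Nat.pow_pos (by norm_num)
      simp only [meas, List.map_cons, List.sum_cons] at hm
      omega
  | succ fuel ih =>
    intro stack answer hpos hm
    cases stack with
    | nil => simp [loopA]
    | cons cur rest =>
      have hcur : 0 ≤ cur := hpos cur (by simp)
      have hrpos : ∀ x ∈ rest, 0 ≤ x := fun x hx => hpos x (List.mem_cons_of_mem _ hx)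
      have hm2 : 4 ^ ((2 * n + 2 - cur).toNat) + meas n rest ≤ fuel + 1 := by
        rw [meas_cons] at hm; exact hm
      have hpow1 : 0 < 4 ^ ((2 * n + 2 - cur).toNat) := Nat.pow_pos (by norm_num)
      by_cases hge : 2 * n ≤ cur
      · have hs := ih rest (answer + 1) hrpos (by omega)
        simp only [loopA, if_pos hge, hs]
        have hc : cA n tiles cur = 1 := by rw [cA]; simp [hge]
        simp only [List.map_cons, List.sum_cons, hc]
        ring
      · have hrange : cur.toNat < tiles.length := by omega
        have hget : PySem.List.pyGet? tiles cur = some (tiles[cur.toNat]'hrange) :=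
          PySem.List.pyGet?_eq_some_getElem _ hcur (by omega)
        have he1 : (2 * n + 2 - (cur + 1)).toNat = (2 * n + 2 - cur).toNat - 1 := by omega
        have he2 : (2 * n + 2 - (cur + 2)).toNat = (2 * n + 2 - cur).toNat - 2 := by omega
        have he3 : 3 ≤ (2 * n + 2 - cur).toNat := by omega
        have hpows := pow4_bound ((2 * n + 2 - cur).toNat) (by omega)
        have hcA : cA n tiles cur =
            (if tiles[cur.toNat]'hrange = 1 then
              2 * cA n tiles (cur + 1) + cA n tiles (cur + 2)
             else if tiles[cur.toNat]'hrange = 0 then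
              cA n tiles (cur + 1) + cA n tiles (cur + 2)
             else 0) := by
          rw [cA, dif_neg (by omega : ¬ 2 * n ≤ cur), hget]
        simp only [loopA, if_neg (by omega : ¬ 2 * n ≤ cur), hget]
        by_cases hv1 : tiles[cur.toNat]'hrange = 1
        · rw [if_pos hv1]
          have hpos' : ∀ x ∈ (cur + 2) :: (cur + 1) :: (cur + 1) :: rest, 0 ≤ x := by
            intro x hx
            simp only [List.mem_cons] at hx
            rcases hx with rfl | rfl | rfl | hx
            · omega
            · omega
            · omega
            · exact hrpos x hx
          have hm' : meas n ((cur + 2) :: (cur + 1) :: (cur + 1) :: rest) ≤ fuel := by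
            rw [meas_cons, meas_cons, meas_cons, he1, he2]
            omega
          have hs := ih _ answer hpos' hm'
          rw [hs]
          simp only [List.map_cons, List.sum_cons]
          rw [hcA, if_pos hv1]
          ring
        · rw [if_neg hv1]
          by_cases hv0 : tiles[cur.toNat]'hrange = 0
          · rw [if_pos hv0]
            have hpos' : ∀ x ∈ (cur + 2) :: (cur + 1) :: rest, 0 ≤ x := by
              intro x hx
              simp only [List.mem_cons] at hx
              rcases hx with rfl | rfl | hx
              · omega
              · omega
              · exact hrpos x hx
            have hm' : meas n ((cur + 2) :: (cur + 1) :: rest) ≤ fuel := by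
              rw [meas_cons, meas_cons, he1, he2]
              omega
            have hs := ih _ answer hpos' hm'
            rw [hs]
            simp only [List.map_cons, List.sum_cons]
            rw [hcA, if_neg hv1, if_pos hv0]
            ring
          · rw [if_neg hv0]
            have hs := ih rest answer hrpos (by omega)
            rw [hs]
            simp only [List.map_cons, List.sum_cons]
            rw [hcA, if_neg hv1, if_neg hv0]
            ring

-- characterization of the tiles array built by fillTiles
def hitP (tops : List Int) (s : Nat) (j : Nat) : Prop :=
  ∃ k < tops.length, tops.getD k 0 = 1 ∧ j = (s + k) * 2 + 1

theorem fillTiles_get_of_not_hit (tops : List Int) :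
    ∀ (tiles : List Int) (s j : Nat), ¬ hitP tops s j →
      (fillTiles tiles s tops)[j]? = tiles[j]? := by
  induction tops with
  | nil => intro tiles s j _; simp [fillTiles]
  | cons top rest ih =>
    intro tiles s j hnp
    have hnp' : ¬ hitP rest (s + 1) j := by
      intro ⟨k, hk, h1, h2⟩
      exact hnp ⟨k + 1, by simpa using hk, by simpa using h1, by omega⟩
    simp only [fillTiles]
    rw [ih _ _ _ hnp']
    by_cases ht : top = 1
    · have hj : j ≠ s * 2 + 1 := by
        intro hje
        exact hnp ⟨0, by simp, by simpa using ht, by omega⟩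
      rw [if_pos ht, List.getElem?_set_ne (by omega)]
    · rw [if_neg ht]

theorem fillTiles_get_of_hit (tops : List Int) :
    ∀ (tiles : List Int) (s j : Nat), hitP tops s j →
      (∀ k < tops.length, tops.getD k 0 = 1 → (s + k) * 2 + 1 < tiles.length) →
      (fillTiles tiles s tops)[j]? = some 1 := by
  induction tops with
  | nil => intro tiles s j hp _; obtain ⟨k, hk, _, _⟩ := hp; simp at hk
  | cons top rest ih =>
    intro tiles s j hp hlen
    obtain ⟨k, hk, h1, h2⟩ := hp
    simp only [fillTiles]
    by_cases hk0 : k = 0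
    · subst hk0
      have ht : top = 1 := by simpa using h1
      rw [if_pos ht]
      have hjlen : j < tiles.length := by
        have := hlen 0 (by simp) (by simpa using ht)
        omega
      by_cases hp' : hitP rest (s + 1) j
      · exact ih _ _ _ hp' (by
          intro k' hk' h1'
          have h := hlen (k' + 1) (by simpa using hk') (by simpa using h1')
          simp only [List.length_set]
          omega)
      · rw [fillTiles_get_of_not_hit _ _ _ _ hp']
        have : j = s * 2 + 1 := by omega
        subst this
        rw [List.getElem?_set_self]
        simp [show s * 2 + 1 < tiles.length from by omega]
    · obtain ⟨k', rfl⟩ : ∃ k', k = k' + 1 := ⟨k - 1, by omega⟩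
      have h1' : rest.getD k' 0 = 1 := by simpa using h1
      have hp' : hitP rest (s + 1) j := ⟨k', by simp only [List.length_cons] at hk; omega, h1', by omega⟩
      have hlen' : ∀ k'' < rest.length, rest.getD k'' 0 = 1 →
          (s + 1 + k'') * 2 + 1 < (if top = 1 then tiles.set (s * 2 + 1) 1 else tiles).length := by
        intro k'' hk'' h1''
        have := hlen (k'' + 1) (by simpa using hk'') (by simpa using h1'')
        by_cases ht : top = 1
        · rw [if_pos ht]; simp only [List.length_set]; omega
        · rw [if_neg ht]; omega
      exact ih _ _ _ hp' hlen'

theorem tilesA_length (n : Int) (tops : List Int) :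
    (tilesA n tops).length = (2 * n + 1).toNat := by
  unfold tilesA; rw [fillTiles_length]; simp

theorem tilesA_hyp (n : Int) (tops : List Int) (hpre : Pre_solution n tops) :
    ∀ k < tops.length, tops.getD k 0 = 1 →
      (0 + k) * 2 + 1 < (List.replicate (2 * n + 1).toNat (0 : Int)).length := by
  intro k hk h1
  have := hpre k hk h1
  simp only [List.length_replicate]
  omega

theorem tilesA_get_hit (n : Int) (tops : List Int) (hpre : Pre_solution n tops)
    (j : Nat) (hp : hitP tops 0 j) : (tilesA n tops)[j]? = some 1 :=
  fillTiles_get_of_hit tops _ 0 j hp (tilesA_hyp n tops hpre)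

theorem tilesA_get_not_hit (n : Int) (tops : List Int)
    (j : Nat) (hj : j < (2 * n + 1).toNat) (hp : ¬ hitP tops 0 j) :
    (tilesA n tops)[j]? = some 0 := by
  unfold tilesA
  rw [fillTiles_get_of_not_hit tops _ 0 j hp]
  simp [List.getElem?_replicate, hj]

-- B's weight condition coincides with 'the tiles array holds 1 at index i'
theorem condB_iff_hit (tops : List Int) (i : Int) (h0 : 0 ≤ i) :
    (PySem.Int.mod i 2 = 1 ∧ PySem.Int.floordiv i 2 < (tops.length : Int) ∧
      PySem.List.pyGet? tops (PySem.Int.floordiv i 2) = some 1) ↔ hitP tops 0 i.toNat := by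
  rw [PySem.Int.mod_eq_emod_of_pos (by norm_num : (0:Int) < 2),
      PySem.Int.floordiv_eq_ediv_of_pos (by norm_num : (0:Int) < 2)]
  rw [PySem.List.pyGet?_of_nonneg tops (by omega : (0:Int) ≤ i / 2)]
  constructor
  · rintro ⟨hodd, hlt, hget⟩
    obtain ⟨hk, hv⟩ := List.getElem?_eq_some_iff.mp hget
    refine ⟨(i / 2).toNat, hk, ?_, by omega⟩
    rw [List.getD_eq_getElem _ _ hk, hv]
  · rintro ⟨k, hk, h1, h2⟩
    have hi : i = 2 * (k : Int) + 1 := by omega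
    have hd : i / 2 = (k : Int) := by omega
    refine ⟨by omega, by omega, ?_⟩
    rw [hd]
    have hkk : ((k : Int)).toNat = k := by omega
    rw [hkk, List.getElem?_eq_some_iff]
    exact ⟨hk, by rw [← List.getD_eq_getElem _ (0:Int) hk]; exact h1⟩

-- the DP step: for 0 ≤ i < 2*n, cA satisfies B's weighted recurrence
theorem cA_step (n : Int) (tops : List Int) (hpre : Pre_solution n tops)
    (i : Int) (h0 : 0 ≤ i) (h2 : i < 2 * n) :
    cA n (tilesA n tops) i =
      (if PySem.Int.mod i 2 = 1 ∧ PySem.Int.floordiv i 2 < (tops.length : Int) ∧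
          PySem.List.pyGet? tops (PySem.Int.floordiv i 2) = some 1
       then 2 else 1) * cA n (tilesA n tops) (i + 1) + cA n (tilesA n tops) (i + 2) := by
  have hlen := tilesA_length n tops
  have hlt : i.toNat < (tilesA n tops).length := by omega
  have hget : PySem.List.pyGet? (tilesA n tops) i = some ((tilesA n tops)[i.toNat]'hlt) :=
    PySem.List.pyGet?_eq_some_getElem _ h0 (by omega)
  rw [cA, dif_neg (by omega : ¬ 2 * n ≤ i), hget]
  by_cases hp : hitP tops 0 i.toNat
  · have hv : (tilesA n tops)[i.toNat]'hlt = 1 := by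
      have := tilesA_get_hit n tops hpre i.toNat hp
      rw [List.getElem?_eq_getElem hlt] at this
      exact Option.some_injective _ this
    rw [hv, if_pos ((condB_iff_hit tops i h0).mpr hp)]
    norm_num
  · have hv : (tilesA n tops)[i.toNat]'hlt = 0 := by
      have := tilesA_get_not_hit n tops i.toNat (by omega) hp
      rw [List.getElem?_eq_getElem hlt] at this
      exact Option.some_injective _ this
    have hnc : ¬ (PySem.Int.mod i 2 = 1 ∧ PySem.Int.floordiv i 2 < (tops.length : Int) ∧
        PySem.List.pyGet? tops (PySem.Int.floordiv i 2) = some 1) :=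
      fun hc => hp ((condB_iff_hit tops i h0).mp hc)
    rw [hv, if_neg hnc]
    norm_num

theorem cA_base (n : Int) (tiles : List Int) (i : Int) (h : 2 * n ≤ i) :
    cA n tiles i = 1 := by rw [cA]; simp [h]

theorem foldB_inv (n : Int) (tops : List Int) (hpre : Pre_solution n tops) :
    ∀ (m : Nat) (j : Int), j = (m : Int) - 1 → j ≤ 2 * n - 1 →
      (PySem.List.pyRange j (-1) (-1)).foldl (stepB tops)
        (cA n (tilesA n tops) (j + 1), cA n (tilesA n tops) (j + 2)) =
      (cA n (tilesA n tops) 0, cA n (tilesA n tops) 1) := by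
  intro m
  induction m with
  | zero =>
    intro j hj _
    rw [PySem.List.pyRange_neg_one_eq_nil (by omega)]
    simp only [List.foldl_nil]
    norm_num [hj]
  | succ m ih =>
    intro j hj hle
    rw [PySem.List.pyRange_neg_one_cons (by omega)]
    simp only [List.foldl_cons]
    have hstep : stepB tops (cA n (tilesA n tops) (j + 1), cA n (tilesA n tops) (j + 2)) j =
        (cA n (tilesA n tops) j, cA n (tilesA n tops) (j + 1)) := by
      simp only [stepB]
      rw [← cA_step n tops hpre j (by omega) (by omega)]
    rw [hstep]
    have := ih (j - 1) (by omega) (by omega)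
    rw [show j - 1 + 1 = j from by ring, show j - 1 + 2 = j + 1 from by ring] at this
    exact this

theorem solution_eq_cA (n : Int) (tops : List Int) (hpre : Pre_solution n tops) :
    solution n tops = PySem.Int.mod (cA n (tilesA n tops) 0) 10007 := by
  unfold solution
  have hlen : 2 * n ≤ ((tilesA n tops).length : Int) := by
    rw [tilesA_length]
    omega
  rw [loopA_inv n _ hlen _ [0] 0 (by simp) (by simp [meas])]
  simp

theorem solution_spec' (n : Int) (tops : List Int) (hpre : Pre_solution n tops) :
    solution n tops = solution_alt n tops := by
  rw [solution_eq_cA n tops hpre]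
  unfold solution_alt
  by_cases hn : n ≤ 0
  · rw [PySem.List.pyRange_neg_one_eq_nil (by omega)]
    simp only [List.foldl_nil]
    rw [cA_base n _ 0 (by omega)]
  · have h1 : cA n (tilesA n tops) (2 * n) = 1 := cA_base _ _ _ (by omega)
    have h2 : cA n (tilesA n tops) (2 * n - 1 + 2) = 1 := cA_base _ _ _ (by omega)
    have := foldB_inv n tops hpre (2 * n).toNat (2 * n - 1) (by omega) (by omega)
    rw [show (2 * n - 1 + 1) = 2 * n from by ring, h1, h2] at this
    rw [this]

-- ===== VERDICT (by name: the statement is the Claim_ definition above) =====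
theorem solution_spec : Claim_equal_solution := by
  intro n tops _ hpre
  unfold Spec_solution
  exact solution_spec' n tops hpre
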